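-- pv_equiv track=rewrite | github.com/zynko1234/adventofcode | 2020/solution/9.py | brute_check
-- ===== SOURCE A (Python) =====
-- def brute_check(in_list, offset):
--     check_index = offset
--     validity_matrix = [False] * (len(in_list) - offset)
--
--     for i in range(offset, len(in_list)):
--         for j in range(check_index - offset, check_index):
--             for k in range(check_index - offset, check_index):
--                     # Don't add things to themselves.
--                     # Check addition.
--                     if (j != k) and ((in_list[j] + in_list[k]) == in_list[i]):
--                         validity_matrix[i - offset] = True
--                         break
--             if validity_matrix[i - offset] is True:
--                 break
--         check_index += 1
--
--     return validity_matrix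
-- ===== SOURCE B (Python) =====
-- from collections import Counter
--
-- def brute_check(in_list, offset):
--     # One pass with a per-window Counter: entry i is True iff some a in the
--     # window has (target - a) present (needing count >= 2 when target - a == a).
--     out = []
--     for i in range(offset, len(in_list)):
--         target = in_list[i]
--         window = Counter(in_list[i - offset:i])
--         out.append(any(window[target - a] >= (2 if target - a == a else 1)
--                        for a in window))
--     return out
-- ===== Notes on version B (the rewrite author's own statement) =====
-- stated objective: faster
-- what changed: Replaces the quadratic scan over all (j,k) pairs inside each window by a Counter of the window checked once per distinct element (target-a present, count>=2 when target-a==a), removing one nested loop.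
-- outside the precondition, e.g. on brute_check([2, 1, 3], -1): A returns [False, False, False, False], B returns [True, False, False, False]
import Mathlib
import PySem

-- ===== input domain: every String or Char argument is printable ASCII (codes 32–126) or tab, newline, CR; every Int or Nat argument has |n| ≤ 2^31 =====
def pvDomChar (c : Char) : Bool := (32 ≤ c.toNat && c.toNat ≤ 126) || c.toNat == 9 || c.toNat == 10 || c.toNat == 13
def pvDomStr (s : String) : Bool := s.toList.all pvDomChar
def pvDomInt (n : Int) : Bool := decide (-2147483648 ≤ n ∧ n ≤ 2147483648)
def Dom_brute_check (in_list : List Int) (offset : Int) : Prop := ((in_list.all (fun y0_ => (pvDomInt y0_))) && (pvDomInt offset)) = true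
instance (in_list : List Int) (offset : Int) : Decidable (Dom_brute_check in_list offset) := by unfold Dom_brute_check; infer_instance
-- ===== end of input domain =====

-- B replaces A's quadratic pair scan per window by a per-window Counter lookup (asymptotically faster, O(n*offset) vs O(n*offset^2)).


-- ===== PORT A =====
-- innermost 'for k in range(...)': returns true iff the loop hits its 'break' (sets validity_matrix[i-offset])
def kLoop (in_list : List Int) (ti : Int) (j : Int) : List Int → Bool
  | [] => false
  | k :: ks =>
    if j ≠ k ∧ PySem.List.pyGetD in_list j 0 + PySem.List.pyGetD in_list k 0 = ti then true
    else kLoop in_list ti j ks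

-- middle 'for j in range(...)' threading validity_matrix; breaks when the entry has become True
def jLoop (in_list : List Int) (offset ci i ti : Int) (vm : List Bool) : List Int → List Bool
  | [] => vm
  | j :: js =>
    let vm' := if kLoop in_list ti j (PySem.List.pyRange (ci - offset) ci 1)
               then PySem.List.pySetD vm (i - offset) true else vm
    if PySem.List.pyGetD vm' (i - offset) false then vm'
    else jLoop in_list offset ci i ti vm' js

def brute_check (in_list : List Int) (offset : Int) : List Bool :=
  let n : Int := PySem.List.len in_list
  let init : List Bool := List.replicate (n - offset).toNat false
  ((PySem.List.pyRange offset n 1).foldl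
    (fun (st : List Bool × Int) (i : Int) =>
      let ci := st.2
      (jLoop in_list offset ci i (PySem.List.pyGetD in_list i 0) st.1
        (PySem.List.pyRange (ci - offset) ci 1), ci + 1))
    (init, offset)).1

-- ===== PORT B =====
-- 'any(window[target - a] >= (2 if target - a == a else 1) for a in window)'
def bCheck (w : PySem.Dict Int Int) (t : Int) : Bool :=
  (PySem.Dict.keys w).any (fun a =>
    decide ((if t - a = a then (2 : Int) else 1) ≤ PySem.Dict.getD w (t - a) 0))

def brute_check_alt (in_list : List Int) (offset : Int) : List Bool :=
  let n : Int := PySem.List.len in_list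
  (PySem.List.pyRange offset n 1).foldl
    (fun out i =>
      let target := PySem.List.pyGetD in_list i 0
      let window := PySem.Dict.counter (PySem.List.slice in_list (some (i - offset)) (some i))
      out ++ [bCheck window target]) []

-- ===== PRECONDITION & SPEC =====
-- Pre_ excludes negative offsets only: a negative window size is meaningless, and there both programs
-- return accidental values (A an all-False list longer than the input, via empty wrapped-around ranges)
-- that no caller could specify; on every offset ≥ 0 the claim is unconditional.
def Pre_brute_check (in_list : List Int) (offset : Int) : Prop := 0 ≤ offset
instance (in_list : List Int) (offset : Int) : Decidable (Pre_brute_check in_list offset) := by unfold Pre_brute_check; infer_instance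
def pvWitness_brute_check : List Int × Int := ([1, 2, 3, 4, 7, 5], 2)
def Spec_brute_check (in_list : List Int) (offset : Int) (out : List Bool) : Prop := out = brute_check_alt in_list offset
instance (in_list : List Int) (offset : Int) (out : List Bool) : Decidable (Spec_brute_check in_list offset out) := by unfold Spec_brute_check; infer_instance

-- ===== CLAIM (what is proved, stated in full; the proofs are below) =====
def Claim_equal_brute_check : Prop := ∀ (in_list : List Int) (offset : Int), Dom_brute_check in_list offset → Pre_brute_check in_list offset → Spec_brute_check in_list offset (brute_check in_list offset)

-- ===== LEMMAS AND PROOFS =====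

-- the Boolean A computes for row i: some pair j ≠ k of window indices sums to in_list[i]
def pairAt (in_list : List Int) (offset i : Int) : Bool :=
  (PySem.List.pyRange (i - offset) i 1).any (fun j =>
    (PySem.List.pyRange (i - offset) i 1).any (fun k =>
      decide (j ≠ k ∧ PySem.List.pyGetD in_list j 0 + PySem.List.pyGetD in_list k 0
                = PySem.List.pyGetD in_list i 0)))

theorem kLoop_eq_any (in_list : List Int) (ti j : Int) (ks : List Int) :
    kLoop in_list ti j ks
      = ks.any (fun k => decide (j ≠ k ∧ PySem.List.pyGetD in_list j 0 + PySem.List.pyGetD in_list k 0 = ti)) := by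
  induction ks with
  | nil => rfl
  | cons k ks ih =>
    simp only [kLoop, List.any_cons]
    split_ifs with h
    · simp [h]
    · simp [h, ih]


theorem mem_iff_getD (W : List Int) (x : Int) :
    x ∈ W ↔ ∃ p, p < W.length ∧ W.getD p 0 = x := by
  rw [List.mem_iff_getElem]
  constructor
  · rintro ⟨p, hp, rfl⟩; exact ⟨p, hp, by simp [List.getElem?_eq_getElem hp]⟩
  · rintro ⟨p, hp, h⟩; exact ⟨p, hp, by rw [← h, List.getD_eq_getElem _ _ hp]⟩

theorem two_le_count_iff (W : List Int) (x : Int) :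
    2 ≤ W.count x ↔ ∃ p q, p < W.length ∧ q < W.length ∧ p ≠ q ∧ W.getD p 0 = x ∧ W.getD q 0 = x := by
  induction W with
  | nil => simp
  | cons b T ih =>
    constructor
    · intro h
      rcases eq_or_ne b x with rfl | hbx
      · have h1 : 1 ≤ T.count b := by simpa [List.count_cons] using h
        have hb : b ∈ T := List.count_pos_iff.mp h1
        obtain ⟨q, hq, hqv⟩ := (mem_iff_getD T b).mp hb
        exact ⟨0, q + 1, by simp, by simpa using hq, by omega, by simp, by simpa using hqv⟩
      · have h2 : 2 ≤ T.count x := by simpa [List.count_cons, hbx] using h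
        obtain ⟨p, q, hp, hq, hpq, hpv, hqv⟩ := ih.mp h2
        exact ⟨p + 1, q + 1, by simpa using hp, by simpa using hq, by omega, by simpa using hpv,
          by simpa using hqv⟩
    · rintro ⟨p, q, hp, hq, hpq, hpv, hqv⟩
      match p, q with
      | 0, 0 => omega
      | 0, q + 1 =>
        have hbx : b = x := by simpa using hpv
        have hmem : x ∈ T := (mem_iff_getD T x).mpr ⟨q, by simpa using hq, by simpa using hqv⟩
        have := List.count_pos_iff.mpr hmem
        simp [hbx]; omega
      | p + 1, 0 =>
        have hbx : b = x := by simpa using hqv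
        have hmem : x ∈ T := (mem_iff_getD T x).mpr ⟨p, by simpa using hp, by simpa using hpv⟩
        have := List.count_pos_iff.mpr hmem
        simp [hbx]; omega
      | p + 1, q + 1 =>
        have h2 := ih.mpr ⟨p, q, by simpa using hp, by simpa using hq, by omega,
          by simpa using hpv, by simpa using hqv⟩
        simp [List.count_cons]; omega

theorem count_pair_iff (W : List Int) (t : Int) :
    (∃ x ∈ W, (if t - x = x then (2 : Int) else 1) ≤ (W.count (t - x) : Int))
      ↔ ∃ p q, p < W.length ∧ q < W.length ∧ p ≠ q ∧ W.getD p 0 + W.getD q 0 = t := by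
  constructor
  · rintro ⟨x, hx, hcnt⟩
    by_cases hc : t - x = x
    · have h2 : 2 ≤ W.count (t - x) := by rw [hc] at hcnt ⊢; exact_mod_cast by simpa using hcnt
      obtain ⟨p, q, hp, hq, hpq, hpv, hqv⟩ := (two_le_count_iff W (t - x)).mp h2
      exact ⟨p, q, hp, hq, hpq, by rw [hpv, hqv]; omega⟩
    · have h1 : 1 ≤ W.count (t - x) := by exact_mod_cast by simpa [hc] using hcnt
      have hmem : t - x ∈ W := List.count_pos_iff.mp h1
      obtain ⟨p, hp, hpv⟩ := (mem_iff_getD W x).mp hx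
      obtain ⟨q, hq, hqv⟩ := (mem_iff_getD W (t - x)).mp hmem
      refine ⟨p, q, hp, hq, ?_, by rw [hpv, hqv]; omega⟩
      rintro rfl; rw [hpv] at hqv; omega
  · rintro ⟨p, q, hp, hq, hpq, hsum⟩
    refine ⟨W.getD p 0, (mem_iff_getD W _).mpr ⟨p, hp, rfl⟩, ?_⟩
    have ht : t - W.getD p 0 = W.getD q 0 := by omega
    by_cases hc : t - W.getD p 0 = W.getD p 0
    · have h2 : 2 ≤ W.count (W.getD p 0) := (two_le_count_iff W _).mpr
        ⟨p, q, hp, hq, hpq, rfl, by omega⟩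
      rw [if_pos hc, hc]; exact_mod_cast h2
    · have hmem : t - W.getD p 0 ∈ W := by
        rw [ht]; exact (mem_iff_getD W _).mpr ⟨q, hq, rfl⟩
      have h1 : 1 ≤ W.count (t - W.getD p 0) := List.count_pos_iff.mpr hmem
      rw [if_neg hc]; exact_mod_cast h1

theorem jLoop_eq (in_list : List Int) (offset ci i ti : Int) (js : List Int)
    (done rest : List Bool) (hidx : i - offset = (done.length : Int)) :
    jLoop in_list offset ci i ti (done ++ false :: rest) js
      = if js.any (fun j => kLoop in_list ti j (PySem.List.pyRange (ci - offset) ci 1))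
        then done ++ true :: rest else done ++ false :: rest := by
  induction js with
  | nil => simp [jLoop]
  | cons j js ih =>
    simp only [jLoop, List.any_cons]
    by_cases hk : kLoop in_list ti j (PySem.List.pyRange (ci - offset) ci 1)
    · rw [if_pos hk]
      have hset : PySem.List.pySetD (done ++ false :: rest) (i - offset) true
          = done ++ true :: rest := by
        rw [PySem.List.pySetD_of_nonneg _ _ (by omega), hidx]
        simp
      rw [hset]
      have hget : PySem.List.pyGetD (done ++ true :: rest) (i - offset) false = true := by
        rw [hidx]
        simpa using PySem.List.pyGetD_natCast (done ++ true :: rest) done.length false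
      rw [hget]
      simp [hk]
    · rw [if_neg hk]
      have hget : PySem.List.pyGetD (done ++ false :: rest) (i - offset) false = false := by
        rw [hidx]
        simpa using PySem.List.pyGetD_natCast (done ++ false :: rest) done.length false
      rw [hget]
      simpa [hk] using ih

theorem foldA (in_list : List Int) (offset : Int) (K : Nat) :
    ∀ (m : Int), offset ≤ m → ((PySem.List.len in_list) - m).toNat = K →
    ∀ done : List Bool, (done.length : Int) = m - offset →
    ((PySem.List.pyRange m (PySem.List.len in_list) 1).foldl
      (fun (st : List Bool × Int) (i : Int) =>
        let ci := st.2
        (jLoop in_list offset ci i (PySem.List.pyGetD in_list i 0) st.1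
          (PySem.List.pyRange (ci - offset) ci 1), ci + 1))
      (done ++ List.replicate K false, m)).1
      = done ++ (PySem.List.pyRange m (PySem.List.len in_list) 1).map (pairAt in_list offset) := by
  induction K with
  | zero =>
    intro m hm hK done hd
    rw [PySem.List.pyRange_one_eq_nil (by omega)]
    simp
  | succ K ih =>
    intro m hm hK done hd
    rw [PySem.List.pyRange_one_cons (by omega)]
    simp only [List.foldl_cons, List.map_cons, List.replicate_succ]
    have hj := jLoop_eq in_list offset m m (PySem.List.pyGetD in_list m 0)
      (PySem.List.pyRange (m - offset) m 1) done (List.replicate K false) (by omega)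
    rw [hj]
    have hcond : (PySem.List.pyRange (m - offset) m 1).any
        (fun j => kLoop in_list (PySem.List.pyGetD in_list m 0) j (PySem.List.pyRange (m - offset) m 1))
        = pairAt in_list offset m := by
      unfold pairAt
      exact PySem.List.any_congr_mem (fun j _ => kLoop_eq_any in_list _ j _)
    rw [hcond]
    by_cases hp : pairAt in_list offset m
    · rw [if_pos hp]
      have := ih (m + 1) (by omega) (by omega) (done ++ [true]) (by simp; omega)
      simpa [hp] using this
    · rw [if_neg (by simp [hp])]
      have := ih (m + 1) (by omega) (by omega) (done ++ [false]) (by simp; omega)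
      simpa [hp, Bool.not_eq_true] using this

theorem brute_check_eq_map (in_list : List Int) (offset : Int) :
    brute_check in_list offset
      = (PySem.List.pyRange offset (PySem.List.len in_list) 1).map (pairAt in_list offset) := by
  unfold brute_check
  have := foldA in_list offset ((PySem.List.len in_list) - offset).toNat offset le_rfl rfl
    [] (by simp)
  simpa using this

theorem brute_check_alt_eq_map (in_list : List Int) (offset : Int) :
    brute_check_alt in_list offset
      = (PySem.List.pyRange offset (PySem.List.len in_list) 1).map (fun i =>
          bCheck (PySem.Dict.counter (PySem.List.slice in_list (some (i - offset)) (some i)))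
            (PySem.List.pyGetD in_list i 0)) := by
  unfold brute_check_alt
  simpa using PySem.List.foldl_append_singleton_eq_map
    (l := PySem.List.pyRange offset (PySem.List.len in_list) 1)
    (f := fun i => bCheck (PySem.Dict.counter (PySem.List.slice in_list (some (i - offset)) (some i)))
      (PySem.List.pyGetD in_list i 0)) (acc := [])

theorem pyGetD_toNat (xs : List Int) (j : Int) (d : Int) (h : 0 ≤ j) :
    PySem.List.pyGetD xs j d = xs.getD j.toNat d := by
  have hj : j = (j.toNat : Int) := by omega
  rw [hj, PySem.List.pyGetD_natCast, Int.toNat_natCast]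

theorem pointwise (in_list : List Int) (offset i : Int) (h0 : 0 ≤ offset)
    (hi : offset ≤ i) (hn : i < (in_list.length : Int)) :
    pairAt in_list offset i
      = bCheck (PySem.Dict.counter (PySem.List.slice in_list (some (i - offset)) (some i)))
          (PySem.List.pyGetD in_list i 0) := by
  have hW : PySem.List.slice in_list (some (i - offset)) (some i)
      = List.take (i.toNat - (i - offset).toNat) (List.drop (i - offset).toNat in_list) :=
    PySem.List.slice_toNat in_list (by omega) (by omega)
  set W := PySem.List.slice in_list (some (i - offset)) (some i) with hWdef
  set t := PySem.List.pyGetD in_list i 0 with ht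
  have hlen : W.length = i.toNat - (i - offset).toNat := by
    rw [hW]; simp; omega
  have hbridge : ∀ p, p < W.length → W.getD p 0 = in_list.getD ((i - offset).toNat + p) 0 := by
    intro p hp
    rw [hlen] at hp
    rw [hW, List.getD_eq_getElem?_getD, List.getD_eq_getElem?_getD,
      List.getElem?_take_of_lt hp, List.getElem?_drop]
  rw [Bool.eq_iff_iff]
  have hA : (0 : Int) ≤ i - offset := by omega
  constructor
  · intro h
    simp only [pairAt, List.any_eq_true, PySem.List.mem_pyRange_one, decide_eq_true_eq] at h
    obtain ⟨j, ⟨hj1, hj2⟩, k, ⟨hk1, hk2⟩, hjk, hsum⟩ := h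
    simp only [bCheck, List.any_eq_true, PySem.Dict.keys_counter, PySem.Set.mem_ofList,
      PySem.Dict.getD_counter, decide_eq_true_eq]
    apply (count_pair_iff W t).mpr
    refine ⟨(j - (i - offset)).toNat, (k - (i - offset)).toNat, by omega, by omega, by omega, ?_⟩
    rw [hbridge _ (by omega), hbridge _ (by omega)]
    rw [pyGetD_toNat _ j _ (by omega), pyGetD_toNat _ k _ (by omega)] at hsum
    have e1 : (i - offset).toNat + (j - (i - offset)).toNat = j.toNat := by omega
    have e2 : (i - offset).toNat + (k - (i - offset)).toNat = k.toNat := by omega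
    rw [e1, e2]; exact hsum
  · intro h
    simp only [bCheck, List.any_eq_true, PySem.Dict.keys_counter, PySem.Set.mem_ofList,
      PySem.Dict.getD_counter, decide_eq_true_eq] at h
    have h' := (count_pair_iff W t).mp h
    obtain ⟨p, q, hp, hq, hpq, hsum⟩ := h'
    simp only [pairAt, List.any_eq_true, PySem.List.mem_pyRange_one, decide_eq_true_eq]
    refine ⟨(i - offset) + p, ⟨by omega, by omega⟩, (i - offset) + q, ⟨by omega, by omega⟩,
      by omega, ?_⟩
    rw [pyGetD_toNat _ _ _ (by omega), pyGetD_toNat _ _ _ (by omega)]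
    have e1 : ((i - offset) + (p : Int)).toNat = (i - offset).toNat + p := by omega
    have e2 : ((i - offset) + (q : Int)).toNat = (i - offset).toNat + q := by omega
    rw [e1, e2, ← hbridge _ hp, ← hbridge _ hq]
    exact hsum

-- ===== VERDICT (by name: the statement is the Claim_ definition above) =====
theorem brute_check_spec : Claim_equal_brute_check := by
  intro in_list offset _ hpre
  unfold Spec_brute_check
  rw [brute_check_eq_map in_list offset, brute_check_alt_eq_map]
  apply List.map_congr_left
  intro i hi
  rw [PySem.List.mem_pyRange_one] at hi
  exact pointwise in_list offset i hpre hi.1 (by simpa using hi.2)
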